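-- pv_equiv track=rewrite | github.com/birc-gsa-2022/ba-python-Ch-Bun | src/ba.py | strict_border_array
-- ===== SOURCE A (Python) =====
-- def border_array(x: str) -> list[int]:
--     #edge case
--     if x == "":
--         return []
--     #built border array
--     ba = [0]*len(x)
--
--     #otherwise run trough seq
--     for i in range(1, len(x)):
--         b = ba[i-1]
--         #extend border
--         while (b > 0) and (x[i] != x[b]):
--             b = ba[b-1]
--         #if matches
--         if(x[i]==x[b]):
--             ba[i] = b + 1
--         else:
--             ba[i] = 0
--
--     return ba
--
-- def strict_border_array(x: str) -> list[int]:
--     # #edge case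
--     # if x == "":
--     #     return []
--
--     # ba = border_array(x)
--     # #built border array
--     # bax = [0]*len(x)
--
--     # #otherwise run trough seq
--     # for i in range(len(x)-1):
--     #     if (ba[i] != 0 and x[ba[i]] != x[i+1]):
--     #         bax[i] = ba[i]
--     #     #Search for shorter border
--     #     elif(ba[i] != 0 and x[ba[i]] == x[i+1]):
--     #         for j in range(1,ba[i]):
--     #             if (x[ba[i]-j] != x[i+1] and x[0:ba[i]-j]==x[i-ba[i]+j+1: i+1]):
--     #                 bax[i] = ba[i]-j
--     #                 break
--     #     else:
--     #         bax[i] = 0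
--     # bax[len(x)-1] = ba[len(x)-1]
--     # return bax
--
--
--     ba = border_array(x)
--     bax = []
--     for i, bai in enumerate(ba):
--         if bai == 0:
--             bax.append(0)
--         elif i == (len(x)-1) or x[i+1] != x[bai]:
--             bax.append(bai)
--         #longest border not strict -> so we search down the borders
--         # if longest wasn't stikt we checck the shorter where we already know that it is not extendable
--         else:
--             bax.append(bax[bai-1])
--     return bax
-- ===== SOURCE B (Python) =====
-- def strict_border_array(x: str) -> list[int]:
--     # Suffix-prefix matching: for each start s, count how far x[s:] matches a
--     # prefix of x; a maximal match of length k witnesses a non-extendable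
--     # border k of the prefix ending at s+k-1.  Scanning s from large to small
--     # keeps the longest such border per position.
--     n = len(x)
--     out = [0] * n
--     for s in range(n - 1, 0, -1):
--         k = 0
--         while s + k < n and x[k] == x[s + k]:
--             k += 1
--         if k > 0:
--             out[s + k - 1] = k
--     return out
-- ===== Notes on version B (the rewrite author's own statement) =====
-- stated objective: alternative
-- what changed: B abandons the KMP failure-function recurrences entirely: for each suffix start s it naively matches x[s:] against the prefix of x (a quadratic Z-function-style scan); a maximal match of length k is exactly a non-extendable border k of the prefix ending at s+k-1, and scanning s from large to small leaves the longest one per position.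
import Mathlib
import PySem

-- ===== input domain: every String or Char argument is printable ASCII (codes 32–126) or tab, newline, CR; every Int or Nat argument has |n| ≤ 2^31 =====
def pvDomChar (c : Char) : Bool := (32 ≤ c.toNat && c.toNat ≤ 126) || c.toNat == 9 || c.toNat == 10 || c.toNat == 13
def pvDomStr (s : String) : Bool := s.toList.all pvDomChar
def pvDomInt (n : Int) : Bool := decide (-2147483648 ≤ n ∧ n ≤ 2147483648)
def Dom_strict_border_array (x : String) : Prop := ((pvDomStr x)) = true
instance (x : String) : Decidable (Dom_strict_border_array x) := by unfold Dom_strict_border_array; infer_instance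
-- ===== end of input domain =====

-- B replaces A's KMP failure-function recurrences by direct suffix-against-prefix
-- matching (a quadratic Z-style scan); same return value, different algorithm.

-- ===== PORT A =====
-- x[i] for an index that is always in range in these programs (exact there)
def pvChr (xs : List Char) (i : Int) : Char := PySem.List.pyGetD xs i ' '
-- ba[i] for an index that is always in range in these programs (exact there)
def pvGetI (l : List Int) (i : Int) : Int := PySem.List.pyGetD l i 0
-- `while b > 0 and x[i] != x[b]: b = ba[b-1]`; fuel b.toNat suffices: border values
-- satisfy ba[j] ≤ j, so b strictly decreases and Python performs at most b iterations.
def pvShrink (xs : List Char) (ba : List Int) (xi : Char) : Nat → Int → Int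
  | 0, b => b
  | fuel+1, b =>
      if 0 < b ∧ xi ≠ pvChr xs b then pvShrink xs ba xi fuel (pvGetI ba (b - 1)) else b

def pvStepA (xs : List Char) (ba : List Int) (i : Int) : List Int :=
  let b0 := pvGetI ba (i - 1)
  let b := pvShrink xs ba (pvChr xs i) b0.toNat b0
  if pvChr xs i = pvChr xs b then PySem.List.pySetD ba i (b + 1)
  else PySem.List.pySetD ba i 0

def pvBorderArray (x : String) : List Int :=
  if x = "" then []
  else
    let xs := x.toList
    (PySem.List.pyRange 1 xs.length 1).foldl (pvStepA xs) (List.replicate xs.length 0)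

def pvStepS (xs : List Char) (n : Int) (bax : List Int) (p : Int × Int) : List Int :=
  if p.2 = 0 then bax ++ [0]
  else if p.1 = n - 1 ∨ pvChr xs (p.1 + 1) ≠ pvChr xs p.2 then bax ++ [p.2]
  else bax ++ [pvGetI bax (p.2 - 1)]

def strict_border_array (x : String) : List Int :=
  let xs := x.toList
  let ba := pvBorderArray x
  (PySem.List.enumerate ba 0).foldl (pvStepS xs xs.length) []

-- ===== PORT B =====
-- `k = 0; while s+k < n and x[k] == x[s+k]: k += 1`; fuel xs.length suffices:
-- every iteration requires s + k < n and increments k, so there are < n iterations.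
def pvZcnt (xs : List Char) (s : Int) : Nat → Int → Int
  | 0, k => k
  | fuel+1, k =>
      if s + k < (xs.length : Int) ∧ pvChr xs k = pvChr xs (s + k) then
        pvZcnt xs s fuel (k + 1)
      else k

def pvStepB (xs : List Char) (out : List Int) (s : Int) : List Int :=
  let k := pvZcnt xs s xs.length 0
  if 0 < k then PySem.List.pySetD out (s + k - 1) k else out

def strict_border_array_alt (x : String) : List Int :=
  let xs := x.toList
  (PySem.List.pyRange ((xs.length : Int) - 1) 0 (-1)).foldl (pvStepB xs) (List.replicate xs.length 0)

-- ===== PRECONDITION & SPEC =====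
def Spec_strict_border_array (x : String) (out : List Int) : Prop := out = strict_border_array_alt x
instance (x : String) (out : List Int) : Decidable (Spec_strict_border_array x out) := by unfold Spec_strict_border_array; infer_instance

-- ===== CLAIM (what is proved, stated in full; the proofs are below) =====
def Claim_equal_strict_border_array : Prop := ∀ (x : String), Dom_strict_border_array x → Spec_strict_border_array x (strict_border_array x)

-- ===== LEMMAS AND PROOFS =====

def ch (l : List Char) (j : Nat) : Char := l.getD j ' '
def cpl : List Char → List Char → Nat
  | a :: as, b :: bs => if a = b then cpl as bs + 1 else 0
  | _, _ => 0
def zfun (l : List Char) (s : Nat) : Nat := cpl l (l.drop s)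

theorem cpl_le_right (u v : List Char) : cpl u v ≤ v.length := by
  induction u generalizing v with
  | nil => cases v <;> simp [cpl]
  | cons a as ih =>
      cases v with
      | nil => simp [cpl]
      | cons b bs =>
          simp only [cpl, List.length_cons]
          split
          · exact Nat.succ_le_succ (ih bs)
          · omega

theorem le_cpl_iff (u v : List Char) (b : Nat) :
    b ≤ cpl u v ↔ b ≤ u.length ∧ b ≤ v.length ∧ ∀ j, j < b → u.getD j ' ' = v.getD j ' ' := by
  induction u generalizing v b with
  | nil =>
      have : cpl [] v = 0 := by cases v <;> rfl
      rw [this]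
      constructor
      · intro h; exact ⟨by simpa using h, by omega, fun j hj => by omega⟩
      · rintro ⟨h, -, -⟩; simpa using h
  | cons a as ih =>
      cases v with
      | nil =>
          have : cpl (a :: as) [] = 0 := rfl
          rw [this]
          constructor
          · intro h; exact ⟨by omega, by simpa using h, fun j hj => by omega⟩
          · rintro ⟨-, h, -⟩; simpa using h
      | cons c cs =>
          cases b with
          | zero => simp
          | succ b' =>
              simp only [cpl, List.length_cons]
              constructor
              · intro h
                split at h
                · next hac =>
                    have h' := (ih cs b').mp (by omega)
                    refine ⟨by omega, by omega, ?_⟩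
                    intro j hj
                    cases j with
                    | zero => simpa [List.getD] using hac
                    | succ j' => simpa [List.getD] using h'.2.2 j' (by omega)
                · omega
              · rintro ⟨h1, h2, h3⟩
                have hac : a = c := by simpa [List.getD] using h3 0 (by omega)
                rw [if_pos hac]
                have : b' ≤ cpl as cs := (ih cs b').mpr
                  ⟨by omega, by omega, fun j hj => by simpa [List.getD] using h3 (j+1) (by omega)⟩
                omega

theorem le_zfun_iff (l : List Char) (s b : Nat) (hs : s ≤ l.length) :
    b ≤ zfun l s ↔ s + b ≤ l.length ∧ ∀ j, j < b → ch l j = ch l (s + j) := by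
  rw [zfun, le_cpl_iff]
  simp only [List.length_drop]
  constructor
  · rintro ⟨h1, h2, h3⟩
    refine ⟨by omega, fun j hj => ?_⟩
    have := h3 j hj
    rwa [List.getD, List.getD, List.getElem?_drop] at this
  · rintro ⟨h1, h2⟩
    refine ⟨by omega, by omega, fun j hj => ?_⟩
    have := h2 j hj
    rw [ch, ch] at this
    rwa [List.getD, List.getD, List.getElem?_drop]

theorem zfun_le (l : List Char) (s : Nat) : zfun l s ≤ l.length - s := by
  have := cpl_le_right l (l.drop s)
  simpa [zfun] using this

def isB (l : List Char) (m b : Nat) : Prop :=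
  b < m ∧ ∀ j, j < b → ch l j = ch l (m - b + j)

theorem isB_iff_z (l : List Char) (m b : Nat) (hm : m ≤ l.length) (hb : b < m) :
    isB l m b ↔ b ≤ zfun l (m - b) := by
  rw [le_zfun_iff l (m - b) b (by omega), isB]
  constructor
  · rintro ⟨-, h⟩
    exact ⟨by omega, h⟩
  · rintro ⟨-, h⟩
    exact ⟨hb, h⟩

theorem isB_nest (l : List Char) (m b c : Nat) (hb : isB l m b) (hc : isB l m c)
    (hlt : b < c) : isB l c b := by
  obtain ⟨hb1, hb2⟩ := hb
  obtain ⟨hc1, hc2⟩ := hc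
  refine ⟨hlt, fun j hj => ?_⟩
  have e1 := hb2 j hj
  have e2 := hc2 (c - b + j) (by omega)
  have harith : m - c + (c - b + j) = m - b + j := by omega
  rw [harith] at e2
  rw [e1, ← e2]

theorem isB_trans (l : List Char) (m b c : Nat) (hb : isB l c b) (hc : isB l m c) :
    isB l m b := by
  obtain ⟨hb1, hb2⟩ := hb
  obtain ⟨hc1, hc2⟩ := hc
  refine ⟨by omega, fun j hj => ?_⟩
  have e1 := hb2 j hj
  have e2 := hc2 (c - b + j) (by omega)
  have harith : m - c + (c - b + j) = m - b + j := by omega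
  rw [harith] at e2
  rw [e1, e2]

theorem isB_ext (l : List Char) (m b : Nat) :
    isB l (m + 1) (b + 1) ↔ isB l m b ∧ ch l b = ch l m := by
  constructor
  · rintro ⟨h1, h2⟩
    have hbm : b < m := by omega
    refine ⟨⟨hbm, fun j hj => ?_⟩, ?_⟩
    · have := h2 j (by omega)
      have harith : m + 1 - (b + 1) + j = m - b + j := by omega
      rwa [harith] at this
    · have := h2 b (by omega)
      have harith : m + 1 - (b + 1) + b = m := by omega
      rwa [harith] at this
  · rintro ⟨⟨h1, h2⟩, h3⟩
    refine ⟨by omega, fun j hj => ?_⟩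
    have harith : m + 1 - (b + 1) + j = m - b + j := by omega
    rw [harith]
    rcases Nat.lt_or_ge j b with hj' | hj'
    · exact h2 j hj'
    · have hjb : j = b := by omega
      subst hjb
      have harith2 : m - j + j = m := by omega
      rw [harith2]; exact h3

def pG (l : List Char) (i t : Nat) : Nat :=
  Nat.findGreatest (fun b => 0 < b ∧ t < i + 1 - b ∧ zfun l (i + 1 - b) = b) i
def Gb (l : List Char) (i : Nat) : Nat := pG l i 0
def blen (l : List Char) (m : Nat) : Nat :=
  Nat.findGreatest (fun b => b ≤ zfun l (m - b)) (m - 1)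

theorem blen_lt (l : List Char) (m : Nat) (h : 0 < m) : blen l m < m := by
  have := Nat.findGreatest_le (P := fun b => b ≤ zfun l (m - b)) (m - 1)
  unfold blen; omega

def dsc (l : List Char) (m : Nat) (c : Nat) : Nat :=
  if h : 0 < c ∧ ch l c ≠ ch l m then dsc l m (blen l c) else c
  termination_by c
  decreasing_by exact blen_lt l c h.1

theorem blen_isB (l : List Char) (m : Nat) (h1 : 1 ≤ m) (h2 : m ≤ l.length) :
    isB l m (blen l m) := by
  have hP : blen l m ≤ zfun l (m - blen l m) :=
    Nat.findGreatest_spec (P := fun b => b ≤ zfun l (m - b)) (n := m - 1) (m := 0)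
      (by omega) (Nat.zero_le _)
  exact (isB_iff_z l m (blen l m) h2 (blen_lt l m (by omega))).mpr hP

theorem blen_ge (l : List Char) (m b : Nat) (h2 : m ≤ l.length) (hb : isB l m b) :
    b ≤ blen l m := by
  have hb1 := hb.1
  have := (isB_iff_z l m b h2 hb1).mp hb
  exact Nat.le_findGreatest (by omega) this

theorem blen_one (l : List Char) : blen l 1 = 0 := rfl

theorem dsc_spec (l : List Char) (m : Nat) (hm : 1 ≤ m) (hn : m ≤ l.length) :
    ∀ c, isB l m c → (∀ b, isB l m b → ch l b = ch l m → b ≤ c) →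
      isB l m (dsc l m c) ∧
      (ch l (dsc l m c) = ch l m → ∀ b, isB l m b → ch l b = ch l m → b ≤ dsc l m c) ∧
      (ch l (dsc l m c) ≠ ch l m → ∀ b, isB l m b → ch l b ≠ ch l m) := by
  intro c
  induction c using Nat.strong_induction_on with
  | _ c ih =>
    intro hc hmax
    rw [dsc]
    by_cases h : 0 < c ∧ ch l c ≠ ch l m
    · rw [dif_pos h]
      have hcn : c ≤ l.length := by have := hc.1; omega
      have hbc : isB l c (blen l c) := blen_isB l c h.1 hcn
      have hc' : isB l m (blen l c) := isB_trans l m (blen l c) c hbc hc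
      have hmax' : ∀ b, isB l m b → ch l b = ch l m → b ≤ blen l c := by
        intro b hb hch
        have hbc' : b ≤ c := hmax b hb hch
        have hbne : b ≠ c := by
          intro he; subst he; exact h.2 hch
        have hblt : b < c := by omega
        exact blen_ge l c b hcn (isB_nest l m b c hb hc hblt)
      exact ih (blen l c) (blen_lt l c h.1) hc' hmax'
    · rw [dif_neg h]
      refine ⟨hc, fun _ => hmax, fun hne b hb hch => ?_⟩
      have hb0 : b ≤ c := hmax b hb hch
      have hc0 : c = 0 := by
        by_contra hc0
        exact h ⟨by omega, hne⟩
      subst hc0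
      have : b = 0 := by omega
      subst this
      exact hne hch

theorem blen_step (l : List Char) (m : Nat) (hm : 1 ≤ m) (hmn : m < l.length) :
    blen l (m + 1) =
      if ch l (dsc l m (blen l m)) = ch l m then dsc l m (blen l m) + 1 else 0 := by
  have hn : m ≤ l.length := by omega
  obtain ⟨hd1, hd2, hd3⟩ := dsc_spec l m hm hn (blen l m) (blen_isB l m hm hn)
    (fun b hb _ => blen_ge l m b hn hb)
  set d := dsc l m (blen l m) with hd
  by_cases hch : ch l d = ch l m
  · rw [if_pos hch]
    have hup : isB l (m + 1) (d + 1) := (isB_ext l m d).mpr ⟨hd1, hch⟩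
    have hge : d + 1 ≤ blen l (m + 1) := blen_ge l (m + 1) (d + 1) (by omega) hup
    have hle : blen l (m + 1) ≤ d + 1 := by
      rcases Nat.eq_zero_or_pos (blen l (m + 1)) with h0 | h0
      · omega
      · obtain ⟨b', hb'⟩ : ∃ b', blen l (m + 1) = b' + 1 := ⟨blen l (m+1) - 1, by omega⟩
        have hB : isB l (m + 1) (blen l (m + 1)) := blen_isB l (m + 1) (by omega) (by omega)
        rw [hb'] at hB
        obtain ⟨hB1, hB2⟩ := (isB_ext l m b').mp hB
        have := hd2 hch b' hB1 hB2
        omega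
    omega
  · rw [if_neg hch]
    by_contra h0
    obtain ⟨b', hb'⟩ : ∃ b', blen l (m + 1) = b' + 1 := ⟨blen l (m+1) - 1, by omega⟩
    have hB : isB l (m + 1) (blen l (m + 1)) := blen_isB l (m + 1) (by omega) (by omega)
    rw [hb'] at hB
    obtain ⟨hB1, hB2⟩ := (isB_ext l m b').mp hB
    exact hd3 hch b' hB1 hB2

theorem NEp_iff (l : List Char) (i b : Nat) (hi : i < l.length) (hb : 0 < b) (hbi : b ≤ i) :
    zfun l (i + 1 - b) = b ↔
      isB l (i + 1) b ∧ (i + 1 = l.length ∨ ch l b ≠ ch l (i + 1)) := by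
  have hs : i + 1 - b ≤ l.length := by omega
  have hiz : isB l (i + 1) b ↔ b ≤ zfun l (i + 1 - b) := isB_iff_z l (i + 1) b (by omega) (by omega)
  constructor
  · intro hz
    have hgeb : b ≤ zfun l (i + 1 - b) := by omega
    refine ⟨hiz.mpr hgeb, ?_⟩
    by_contra hcon
    push_neg at hcon
    obtain ⟨hne, hcheq⟩ := hcon
    have hlt : i + 1 < l.length := by omega
    -- extendability: z ≥ b + 1, contradicting z = b
    have : b + 1 ≤ zfun l (i + 1 - b) := by
      rw [le_zfun_iff l _ _ hs]
      refine ⟨by omega, fun j hj => ?_⟩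
      rcases Nat.lt_or_ge j b with hj' | hj'
      · have := (hiz.mpr hgeb).2 j hj'
        have harith : i + 1 - b + j = i + 1 - b + j := rfl
        exact this
      · have hjb : j = b := by omega
        subst hjb
        have harith : i + 1 - j + j = i + 1 := by omega
        rw [harith]
        exact hcheq
    omega
  · rintro ⟨hB, hcond⟩
    have hgeb : b ≤ zfun l (i + 1 - b) := hiz.mp hB
    have hle : zfun l (i + 1 - b) ≤ b := by
      rcases hcond with hend | hne
      · have := zfun_le l (i + 1 - b)
        omega
      · by_contra hgt
        push_neg at hgt
        have : b + 1 ≤ zfun l (i + 1 - b) := by omega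
        rw [le_zfun_iff l _ _ hs] at this
        have := this.2 b (by omega)
        have harith : i + 1 - b + b = i + 1 := by omega
        rw [harith] at this
        exact hne this
    omega

theorem findGreatest_congr (P Q : Nat → Prop) [DecidablePred P] [DecidablePred Q] (N : Nat)
    (h : ∀ b, b ≤ N → (P b ↔ Q b)) : Nat.findGreatest P N = Nat.findGreatest Q N := by
  induction N with
  | zero => rfl
  | succ n ih =>
      rw [Nat.findGreatest_succ, Nat.findGreatest_succ]
      rw [ih (fun b hb => h b (by omega))]
      by_cases hp : P (n + 1)
      · rw [if_pos hp, if_pos ((h (n+1) le_rfl).mp hp)]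
      · rw [if_neg hp, if_neg (fun hq => hp ((h (n+1) le_rfl).mpr hq))]

-- pG's predicate at t = 0 on the relevant range, in border language
theorem pG_zero_pred (l : List Char) (i b : Nat) (hi : i < l.length) (hb : b ≤ i) :
    (0 < b ∧ 0 < i + 1 - b ∧ zfun l (i + 1 - b) = b) ↔
      (0 < b ∧ isB l (i + 1) b ∧ (i + 1 = l.length ∨ ch l b ≠ ch l (i + 1))) := by
  constructor
  · rintro ⟨h1, h2, h3⟩
    exact ⟨h1, (NEp_iff l i b hi h1 hb).mp h3⟩
  · rintro ⟨h1, h2, h3⟩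
    exact ⟨h1, by omega, (NEp_iff l i b hi h1 hb).mpr ⟨h2, h3⟩⟩

theorem Gb_eq_iff (l : List Char) (i g : Nat) (hi : i < l.length) :
    Gb l i = g ↔ g ≤ i ∧
      (g ≠ 0 → (isB l (i + 1) g ∧ (i + 1 = l.length ∨ ch l g ≠ ch l (i + 1)))) ∧
      (∀ b, g < b → b ≤ i → ¬(0 < b ∧ isB l (i + 1) b ∧ (i + 1 = l.length ∨ ch l b ≠ ch l (i + 1)))) := by
  unfold Gb pG
  rw [Nat.findGreatest_eq_iff]
  constructor
  · rintro ⟨h1, h2, h3⟩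
    refine ⟨h1, fun hg => ?_, fun b hgb hbi hP => ?_⟩
    · have := h2 hg
      exact ((pG_zero_pred l i g hi h1).mp this).2
    · exact h3 hgb hbi ((pG_zero_pred l i b hi hbi).mpr ⟨hP.1, hP.2.1, hP.2.2⟩)
  · rintro ⟨h1, h2, h3⟩
    refine ⟨h1, fun hg => ?_, fun b hgb hbi hP => ?_⟩
    · exact (pG_zero_pred l i g hi h1).mpr ⟨by omega, h2 hg⟩
    · have := (pG_zero_pred l i b hi hbi).mp hP
      exact h3 b hgb hbi this

theorem Gb_rec (l : List Char) (i : Nat) (hi : i < l.length) :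
    Gb l i =
      if blen l (i + 1) = 0 then 0
      else if i = l.length - 1 ∨ ch l (i + 1) ≠ ch l (blen l (i + 1)) then blen l (i + 1)
      else Gb l (blen l (i + 1) - 1) := by
  have hn1 : i + 1 ≤ l.length := by omega
  set c := blen l (i + 1) with hc
  by_cases hc0 : c = 0
  · rw [if_pos hc0]
    rw [Gb_eq_iff l i 0 hi]
    refine ⟨by omega, fun h => absurd rfl h, fun b h0b hbi hP => ?_⟩
    have := blen_ge l (i + 1) b hn1 hP.2.1
    omega
  · rw [if_neg hc0]
    have hcB : isB l (i + 1) c := blen_isB l (i + 1) (by omega) hn1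
    have hci : c ≤ i := by have := hcB.1; omega
    by_cases hlast : i = l.length - 1 ∨ ch l (i + 1) ≠ ch l c
    · rw [if_pos hlast]
      rw [Gb_eq_iff l i c hi]
      refine ⟨hci, fun _ => ⟨hcB, ?_⟩, fun b hcb hbi hP => ?_⟩
      · rcases hlast with h | h
        · left; omega
        · right; exact fun he => h he.symm
      · have := blen_ge l (i + 1) b hn1 hP.2.1
        omega
    · push_neg at hlast
      obtain ⟨hnotlast, hcheq⟩ := hlast
      rw [if_neg (by push_neg; exact ⟨hnotlast, hcheq⟩)]
      have hilt : i + 1 < l.length := by omega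
      have hc1 : 1 ≤ c := by omega
      have hc1i : c - 1 < l.length := by omega
      -- set equality of candidates
      have hiff : ∀ b, b ≤ i →
          ((0 < b ∧ isB l (i + 1) b ∧ (i + 1 = l.length ∨ ch l b ≠ ch l (i + 1))) ↔
           (0 < b ∧ b ≤ c - 1 ∧ isB l (c - 1 + 1) b ∧ (c - 1 + 1 = l.length ∨ ch l b ≠ ch l (c - 1 + 1)))) := by
        intro b hbi
        have hcc : c - 1 + 1 = c := by omega
        rw [hcc]
        constructor
        · rintro ⟨h1, h2, h3⟩
          have hbc : b ≤ c := blen_ge l (i + 1) b hn1 h2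
          have hbne : b ≠ c := by
            intro he
            rcases h3 with h | h
            · omega
            · rw [he] at h; exact h hcheq.symm
          have hblt : b < c := by omega
          refine ⟨h1, by omega, isB_nest l (i + 1) b c h2 hcB hblt, Or.inr ?_⟩
          rcases h3 with h | h
          · omega
          · rw [← hcheq]
            exact h
        · rintro ⟨h1, h2, h3, h4⟩
          have hcln : c ≠ l.length := by omega
          have hbchne : ch l b ≠ ch l c := by
            rcases h4 with h | h
            · exact absurd h hcln
            · exact h
          refine ⟨h1, isB_trans l (i + 1) b c h3 hcB, Or.inr ?_⟩
          rw [hcheq]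
          exact hbchne
      -- both sides equal findGreatest of the same predicate
      rw [Gb_eq_iff l i (Gb l (c - 1)) hi]
      have hGc := (Gb_eq_iff l (c - 1) (Gb l (c - 1)) hc1i).mp rfl
      obtain ⟨g1, g2, g3⟩ := hGc
      refine ⟨by omega, fun hg => ?_, fun b hgb hbi hP => ?_⟩
      · have := g2 hg
        have := (hiff (Gb l (c - 1)) (by omega)).mpr ⟨by omega, by omega, (g2 hg).1, (g2 hg).2⟩
        exact ⟨this.2.1, this.2.2⟩
      · have hP' := (hiff b hbi).mp ⟨hP.1, hP.2.1, hP.2.2⟩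
        exact g3 b hgb (by omega) ⟨hP'.1, hP'.2.2.1, hP'.2.2.2⟩

-- ===== A-port simulation =====

theorem pvGetI_map_range (f : Nat → Int) (n j : Nat) (hj : j < n) :
    pvGetI ((List.range n).map f) ((j : Nat) : Int) = f j := by
  simp [pvGetI, PySem.List.pyGetD_natCast, List.getD, List.getElem?_map, List.getElem?_range, hj]

theorem pvChr_natCast (l : List Char) (j : Nat) : pvChr l ((j : Nat) : Int) = ch l j := by
  simp [pvChr, ch, PySem.List.pyGetD_natCast]

theorem pvShrink_eq_dsc (l : List Char) (M : List Int) (m K : Nat)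
    (hba : ∀ c : Nat, 1 ≤ c → c ≤ K → pvGetI M ((c : Int) - 1) = (blen l c : Int)) :
    ∀ fuel (c : Nat), c ≤ fuel → c ≤ K →
      pvShrink l M (pvChr l (m : Int)) fuel ((c : Nat) : Int) = ((dsc l m c : Nat) : Int) := by
  intro fuel
  induction fuel with
  | zero =>
      intro c hc _
      have hc0 : c = 0 := by omega
      subst hc0
      rw [dsc]
      norm_num [pvShrink]
  | succ fuel ih =>
      intro c hc hK
      rw [dsc]
      simp only [pvShrink]
      by_cases hcond : 0 < c ∧ ch l c ≠ ch l m
      · have hcint : 0 < ((c : Nat) : Int) ∧ pvChr l (m : Int) ≠ pvChr l ((c : Nat) : Int) := by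
          rw [pvChr_natCast, pvChr_natCast]
          exact ⟨by exact_mod_cast hcond.1, fun he => hcond.2 he.symm⟩
        rw [if_pos hcint, dif_pos hcond]
        have hlookup : pvGetI M (((c : Nat) : Int) - 1) = ((blen l c : Nat) : Int) :=
          hba c hcond.1 hK
        rw [hlookup]
        exact ih (blen l c) (by have := blen_lt l c hcond.1; omega)
          (by have := blen_lt l c hcond.1; omega)
      · have hcint : ¬(0 < ((c : Nat) : Int) ∧ pvChr l (m : Int) ≠ pvChr l ((c : Nat) : Int)) := by
          rw [pvChr_natCast, pvChr_natCast]
          intro ⟨h1, h2⟩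
          exact hcond ⟨by exact_mod_cast h1, fun he => h2 he.symm⟩
        rw [if_neg hcint, dif_neg hcond]

theorem A1_inv (l : List Char) (hl : 0 < l.length) :
    ∀ k, k < l.length →
      (PySem.List.pyRange 1 ((k : Int) + 1) 1).foldl (pvStepA l) (List.replicate l.length 0)
        = (List.range l.length).map (fun j => if j ≤ k then (blen l (j + 1) : Int) else 0) := by
  intro k
  induction k with
  | zero =>
      intro _
      rw [show ((0 : Nat) : Int) + 1 = 1 by norm_num, PySem.List.pyRange_one_eq_nil le_rfl]
      simp only [List.foldl_nil]
      apply List.ext_getElem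
      · simp
      · intro j h1 h2
        simp only [List.getElem_replicate, List.getElem_map, List.getElem_range]
        split
        · next h => 
            have : j = 0 := by omega
            subst this
            rw [blen_one]
            rfl
        · rfl
  | succ k ih =>
      intro hk1
      have hk : k < l.length := by omega
      have hsplit : PySem.List.pyRange 1 (((k + 1 : Nat) : Int) + 1) 1
          = PySem.List.pyRange 1 ((k : Int) + 1) 1 ++ [(k : Int) + 1] := by
        have h1 : ((k + 1 : Nat) : Int) + 1 = ((k : Int) + 1) + 1 := by push_cast; ring
        rw [h1, PySem.List.pyRange_one_succ_right (by omega)]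
      rw [hsplit, List.foldl_append, ih hk]
      simp only [List.foldl_cons, List.foldl_nil]
      set M := (List.range l.length).map (fun j => if j ≤ k then (blen l (j + 1) : Int) else 0)
        with hM
      have hcast : (k : Int) + 1 = ((k + 1 : Nat) : Int) := by push_cast; ring
      have hb0 : pvGetI M ((k : Int) + 1 - 1) = (blen l (k + 1) : Int) := by
        have h2 : (k : Int) + 1 - 1 = ((k : Nat) : Int) := by ring
        rw [h2, hM, pvGetI_map_range _ _ _ hk, if_pos le_rfl]
      have hba : ∀ c : Nat, 1 ≤ c → c ≤ k → pvGetI M ((c : Int) - 1) = (blen l c : Int) := by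
        intro c h1 h2
        have h3 : ((c : Nat) : Int) - 1 = ((c - 1 : Nat) : Int) := by omega
        rw [h3, hM, pvGetI_map_range _ _ _ (by omega), if_pos (by omega)]
        rw [show c - 1 + 1 = c from by omega]
      have hblt : blen l (k + 1) ≤ k := by have := blen_lt l (k + 1) (by omega); omega
      have hshr : pvShrink l M (pvChr l ((k : Int) + 1)) (blen l (k + 1) : Int).toNat
            ((blen l (k + 1) : Nat) : Int)
          = ((dsc l (k + 1) (blen l (k + 1)) : Nat) : Int) := by
        rw [hcast]
        exact pvShrink_eq_dsc l M (k + 1) k hba _ (blen l (k + 1)) (by simp) hblt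
      unfold pvStepA
      rw [hb0]
      simp only [hshr]
      have hstep := blen_step l (k + 1) (by omega) hk1
      have hdi : dsc l (k + 1) (blen l (k + 1)) < l.length := by
        have hd := dsc_spec l (k + 1) (by omega) (by omega) (blen l (k + 1))
          (blen_isB l (k + 1) (by omega) (by omega))
          (fun b hb _ => blen_ge l (k + 1) b (by omega) hb)
        have := hd.1.1
        omega
      set d := dsc l (k + 1) (blen l (k + 1)) with hd
      have hsetgoal : ∀ v : Int, v = (blen l (k + 2) : Int) →
          PySem.List.pySetD M ((k : Int) + 1) v
            = (List.range l.length).map (fun j => if j ≤ k + 1 then (blen l (j + 1) : Int) else 0) := by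
        intro v hv
        rw [hcast, PySem.List.pySetD_natCast]
        apply List.ext_getElem
        · simp [hM]
        · intro j h1 h2
          rw [List.getElem_set]
          simp only [hM, List.getElem_map, List.getElem_range]
          split
          · next he =>
              subst hv
              have hj : j = k + 1 := by omega
              subst hj
              rw [if_pos le_rfl]
          · next he =>
              by_cases hjk : j ≤ k
              · rw [if_pos hjk, if_pos (by omega)]
              · rw [if_neg hjk, if_neg (by omega)]
      by_cases hch : pvChr l ((k : Int) + 1) = pvChr l ((d : Nat) : Int)
      · rw [if_pos hch]
        apply hsetgoal
        rw [hcast, pvChr_natCast, pvChr_natCast] at hch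
        rw [show k + 2 = (k + 1) + 1 by ring, hstep, if_pos hch.symm]
        push_cast
        ring
      · rw [if_neg hch]
        apply hsetgoal
        rw [hcast, pvChr_natCast, pvChr_natCast] at hch
        rw [show k + 2 = (k + 1) + 1 by ring, hstep, if_neg (fun h => hch h.symm)]
        rfl

theorem A2_inv (l : List Char) :
    ∀ t, t ≤ l.length →
      ((List.range t).map (fun (j : Nat) => ((j : Int), (blen l (j + 1) : Int)))).foldl
          (pvStepS l (l.length : Int)) []
        = (List.range t).map (fun j => (Gb l j : Int)) := by
  intro t
  induction t with
  | zero => intro _; rfl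
  | succ t ih =>
      intro ht
      have htl : t < l.length := by omega
      rw [List.range_succ, List.map_append, List.map_append, List.foldl_append, ih (by omega)]
      simp only [List.map_cons, List.map_nil, List.foldl_cons, List.foldl_nil]
      set acc := (List.range t).map (fun j => (Gb l j : Int)) with hacc
      unfold pvStepS
      simp only
      have hrec := Gb_rec l t htl
      by_cases hb0 : blen l (t + 1) = 0
      · rw [if_pos (by exact_mod_cast congrArg (Nat.cast : Nat → Int) hb0)]
        rw [hrec, if_pos hb0]
        norm_num
      · rw [if_neg (by exact_mod_cast fun h => hb0 (by exact_mod_cast h))]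
        have hcnd : (((t : Nat) : Int) = (l.length : Int) - 1
              ∨ pvChr l (((t : Nat) : Int) + 1) ≠ pvChr l ((blen l (t + 1) : Nat) : Int))
            ↔ (t = l.length - 1 ∨ ch l (t + 1) ≠ ch l (blen l (t + 1))) := by
          have e1 : (((t : Nat) : Int) = (l.length : Int) - 1) ↔ t = l.length - 1 := by omega
          have e2 : ((t : Nat) : Int) + 1 = ((t + 1 : Nat) : Int) := by push_cast; ring
          rw [e1, e2, pvChr_natCast, pvChr_natCast]
        by_cases hc2 : t = l.length - 1 ∨ ch l (t + 1) ≠ ch l (blen l (t + 1))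
        · rw [if_pos (hcnd.mpr hc2), hrec, if_neg hb0, if_pos hc2]
        · rw [if_neg (fun h => hc2 (hcnd.mp h)), hrec, if_neg hb0, if_neg hc2]
          have hclt : blen l (t + 1) ≤ t := by have := blen_lt l (t + 1) (by omega); omega
          have ht1 : 1 ≤ blen l (t + 1) := by omega
          have hidx : ((blen l (t + 1) : Nat) : Int) - 1 = ((blen l (t + 1) - 1 : Nat) : Int) := by
            omega
          rw [hidx, hacc, pvGetI_map_range _ _ _ (by omega)]

theorem enumerate_map_range {α : Type} (f : Nat → α) (n : Nat) :
    PySem.List.enumerate ((List.range n).map f) 0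
      = (List.range n).map (fun (j : Nat) => ((j : Int), f j)) := by
  induction n with
  | zero => rfl
  | succ n ih =>
      rw [List.range_succ, List.map_append, List.map_append, PySem.List.enumerate_append, ih]
      simp [PySem.List.enumerate_cons, PySem.List.enumerate_nil]

theorem A_chars (x : String) :
    strict_border_array x = (List.range x.toList.length).map (fun i => (Gb x.toList i : Int)) := by
  by_cases hx : x.toList.length = 0
  · have hnil : x.toList = [] := List.length_eq_zero_iff.mp hx
    have hxe : x = "" := String.toList_eq_nil_iff.mp hnil
    subst hxe
    rfl
  · have hpos : 0 < x.toList.length := Nat.pos_of_ne_zero hx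
    have hxe : x ≠ "" := by
      intro h
      rw [h] at hpos
      simp at hpos
    set l := x.toList with hl
    set n := l.length with hn
    have hba : pvBorderArray x = (List.range n).map (fun j => (blen l (j + 1) : Int)) := by
      unfold pvBorderArray
      rw [if_neg hxe]
      have := A1_inv l hpos (n - 1) (by omega)
      have hcast : ((n - 1 : Nat) : Int) + 1 = (n : Int) := by omega
      rw [hcast] at this
      simp only [← hl, ← hn] at this ⊢
      rw [this]
      apply List.map_congr_left
      intro j hj
      rw [List.mem_range] at hj
      rw [if_pos (by omega)]
    unfold strict_border_array
    simp only [← hl, ← hn]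
    rw [hba, enumerate_map_range, A2_inv l n le_rfl]

-- ===== B-port simulation =====

theorem ch_eq_getElem (l : List Char) (j : Nat) (h : j < l.length) : ch l j = l[j] := by
  simp [ch, List.getD, List.getElem?_eq_getElem h]

theorem cpl_nil_right (u : List Char) : cpl u [] = 0 := by cases u <;> rfl

theorem cpl_nil_left (v : List Char) : cpl [] v = 0 := by cases v <;> rfl

theorem cpl_drop_pos (l : List Char) (a b : Nat) :
    0 < cpl (l.drop a) (l.drop b) ↔ a < l.length ∧ b < l.length ∧ ch l a = ch l b := by
  rcases Nat.lt_or_ge a l.length with ha | ha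
  · rcases Nat.lt_or_ge b l.length with hb | hb
    · rw [List.drop_eq_getElem_cons ha, List.drop_eq_getElem_cons hb]
      simp only [cpl]
      split
      · next h =>
          constructor
          · intro _
            refine ⟨ha, hb, ?_⟩
            rw [ch_eq_getElem l a ha, ch_eq_getElem l b hb]
            exact h
          · intro _
            omega
      · next h =>
          constructor
          · intro hpos
            omega
          · rintro ⟨-, -, hch⟩
            exfalso
            apply h
            rw [ch_eq_getElem l a ha, ch_eq_getElem l b hb] at hch
            exact hch
    · rw [List.drop_eq_nil_of_le (by omega : l.length ≤ b), cpl_nil_right]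
      constructor
      · intro h; omega
      · rintro ⟨-, h, -⟩; omega
  · rw [List.drop_eq_nil_of_le (by omega : l.length ≤ a), cpl_nil_left]
    constructor
    · intro h; omega
    · rintro ⟨h, -, -⟩; omega

theorem cpl_drop_succ (l : List Char) (a b : Nat) (ha : a < l.length) (hb : b < l.length)
    (hch : ch l a = ch l b) :
    cpl (l.drop a) (l.drop b) = cpl (l.drop (a + 1)) (l.drop (b + 1)) + 1 := by
  rw [List.drop_eq_getElem_cons ha, List.drop_eq_getElem_cons hb]
  have h : l[a] = l[b] := by
    rw [ch_eq_getElem l a ha, ch_eq_getElem l b hb] at hch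
    exact hch
  simp only [cpl, if_pos h]

theorem pvZcnt_eq (l : List Char) (s : Nat) :
    ∀ fuel (k : Nat), cpl (l.drop k) (l.drop (s + k)) ≤ fuel →
      pvZcnt l (s : Int) fuel ((k : Nat) : Int)
        = ((k + cpl (l.drop k) (l.drop (s + k)) : Nat) : Int) := by
  intro fuel
  induction fuel with
  | zero =>
      intro k hk
      have h0 : cpl (l.drop k) (l.drop (s + k)) = 0 := by omega
      rw [h0]
      rfl
  | succ fuel ih =>
      intro k hk
      simp only [pvZcnt]
      by_cases hpos : 0 < cpl (l.drop k) (l.drop (s + k))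
      · obtain ⟨hkl, hskl, hch⟩ := (cpl_drop_pos l k (s + k)).mp hpos
        have hcond : (s : Int) + ((k : Nat) : Int) < (l.length : Int)
            ∧ pvChr l ((k : Nat) : Int) = pvChr l ((s : Int) + ((k : Nat) : Int)) := by
          have e : (s : Int) + ((k : Nat) : Int) = ((s + k : Nat) : Int) := by push_cast; ring
          rw [e, pvChr_natCast, pvChr_natCast]
          exact ⟨by omega, hch⟩
        rw [if_pos hcond]
        have hsucc := cpl_drop_succ l k (s + k) hkl hskl hch
        have e2 : ((k : Nat) : Int) + 1 = ((k + 1 : Nat) : Int) := by push_cast; ring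
        have e3 : s + (k + 1) = s + k + 1 := by ring
        rw [e2, ih (k + 1) (by rw [e3]; omega), e3]
        congr 1
        omega
      · have h0 : cpl (l.drop k) (l.drop (s + k)) = 0 := by omega
        have hcond : ¬((s : Int) + ((k : Nat) : Int) < (l.length : Int)
            ∧ pvChr l ((k : Nat) : Int) = pvChr l ((s : Int) + ((k : Nat) : Int))) := by
          intro ⟨h1, h2⟩
          have e : (s : Int) + ((k : Nat) : Int) = ((s + k : Nat) : Int) := by push_cast; ring
          rw [e, pvChr_natCast, pvChr_natCast] at h2
          exact hpos ((cpl_drop_pos l k (s + k)).mpr ⟨by omega, by omega, h2⟩)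
        rw [if_neg hcond, h0]
        norm_num

theorem pvZcnt_z (l : List Char) (s : Nat) :
    pvZcnt l (s : Int) l.length 0 = (zfun l s : Int) := by
  have h := pvZcnt_eq l s l.length 0 (by
    have := cpl_le_right (l.drop 0) (l.drop (s + 0))
    simp only [List.length_drop] at this
    omega)
  simp only [Nat.cast_zero] at h
  rw [h]
  simp [zfun]

theorem pG_top (l : List Char) (i : Nat) (hi : i < l.length) : pG l i (l.length - 1) = 0 := by
  unfold pG
  rw [Nat.findGreatest_eq_iff]
  exact ⟨by omega, fun h => absurd rfl h, fun b h1 h2 hP => by omega⟩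

theorem stepB_eq (l : List Char) (s : Nat) (h1 : 1 ≤ s) (h2 : s ≤ l.length - 1) :
    pvStepB l ((List.range l.length).map (fun i => (pG l i s : Int))) (s : Int)
      = (List.range l.length).map (fun i => (pG l i (s - 1) : Int)) := by
  have hsl : s < l.length := by omega
  unfold pvStepB
  rw [pvZcnt_z]
  obtain ⟨K, hzK⟩ : ∃ K, zfun l s = K := ⟨_, rfl⟩
  have hKle : K ≤ l.length - s := by rw [← hzK]; exact zfun_le l s
  rw [hzK]
  by_cases hK0 : K = 0
  · rw [if_neg (by simp [hK0])]
    apply List.map_congr_left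
    intro i hi
    rw [List.mem_range] at hi
    congr 1
    unfold pG
    apply findGreatest_congr
    intro b hb
    constructor
    · rintro ⟨p1, p2, p3⟩
      exact ⟨p1, by omega, p3⟩
    · rintro ⟨p1, p2, p3⟩
      refine ⟨p1, ?_, p3⟩
      by_contra hnot
      have he : i + 1 - b = s := by omega
      rw [he, hzK] at p3
      omega
  · rw [if_pos (by exact_mod_cast Nat.pos_of_ne_zero hK0 : (0 : Int) < (K : Int))]
    have hidx : (s : Int) + (K : Int) - 1 = ((s + K - 1 : Nat) : Int) := by omega
    rw [hidx, PySem.List.pySetD_natCast]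
    have hidxlt : s + K - 1 < l.length := by omega
    apply List.ext_getElem
    · simp
    · intro j hj1 hj2
      simp only [List.length_set, List.length_map, List.length_range] at hj1
      rw [List.getElem_set]
      simp only [List.getElem_map, List.getElem_range]
      split
      · next he =>
          -- j = s + K - 1 : the new exact match is the (largest) candidate
          have hj : j = s + K - 1 := by omega
          subst hj
          have : pG l (s + K - 1) (s - 1) = K := by
            unfold pG
            rw [Nat.findGreatest_eq_iff]
            refine ⟨by omega, fun _ => ⟨by omega, by omega, ?_⟩, fun b hb1 hb2 hP => ?_⟩
            · rw [show s + K - 1 + 1 - K = s from by omega, hzK]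
            · obtain ⟨p1, p2, p3⟩ := hP
              omega
          rw [this]
      · next he =>
          congr 1
          unfold pG
          apply findGreatest_congr
          intro b hb
          constructor
          · rintro ⟨p1, p2, p3⟩
            exact ⟨p1, by omega, p3⟩
          · rintro ⟨p1, p2, p3⟩
            refine ⟨p1, ?_, p3⟩
            by_contra hnot
            have heq : j + 1 - b = s := by omega
            rw [heq, hzK] at p3
            omega

theorem pyRange_neg1_nil (a b : Int) (h : a ≤ b) : PySem.List.pyRange a b (-1) = [] := by
  simp only [PySem.List.pyRange]
  norm_num
  intro h'
  omega

theorem pyRange_neg1_succ (a t : Int) (h : t ≤ a) :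
    PySem.List.pyRange a (t - 1) (-1) = PySem.List.pyRange a t (-1) ++ [t] := by
  simp only [PySem.List.pyRange]
  norm_num
  rw [if_pos h]
  have hc1 : (a - (t - 1)).toNat = (a - t).toNat + 1 := by omega
  by_cases hta : t < a
  · rw [if_pos hta, hc1, List.range_succ, List.map_append]
    congr 1
    simp only [List.map_cons, List.map_nil]
    congr 1
    omega
  · rw [if_neg hta]
    have hta' : t = a := by omega
    subst hta'
    rw [hc1]
    simp only [List.range_succ, List.map_append]
    rw [show (t - t).toNat = 0 from by omega]
    simp only [List.range_zero, List.map_nil, List.nil_append, List.map_cons, List.map_nil]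
    congr 1
    omega

theorem B_inv (l : List Char) (hl : 0 < l.length) :
    ∀ d, d ≤ l.length - 1 →
      (PySem.List.pyRange ((l.length : Int) - 1) ((l.length - 1 - d : Nat) : Int) (-1)).foldl
          (pvStepB l) (List.replicate l.length 0)
        = (List.range l.length).map (fun i => (pG l i (l.length - 1 - d) : Int)) := by
  intro d
  induction d with
  | zero =>
      intro _
      have e : ((l.length - 1 - 0 : Nat) : Int) = (l.length : Int) - 1 := by omega
      rw [e, pyRange_neg1_nil _ _ le_rfl]
      simp only [List.foldl_nil]
      apply List.ext_getElem
      · simp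
      · intro j hj1 hj2
        simp only [List.length_replicate] at hj1
        rw [List.getElem_replicate]
        simp only [List.getElem_map, List.getElem_range]
        rw [show l.length - 1 - 0 = l.length - 1 by omega, pG_top l j hj1]
        rfl
  | succ d ih =>
      intro hd
      have e : ((l.length - 1 - (d + 1) : Nat) : Int) = ((l.length - 1 - d : Nat) : Int) - 1 := by
        omega
      rw [e, pyRange_neg1_succ _ _ (by omega), List.foldl_append, ih (by omega)]
      simp only [List.foldl_cons, List.foldl_nil]
      have hs := stepB_eq l (l.length - 1 - d) (by omega) (by omega)
      rw [hs]
      simp only [show l.length - 1 - d - 1 = l.length - 1 - (d + 1) from by omega]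

theorem B_chars (x : String) :
    strict_border_array_alt x
      = (List.range x.toList.length).map (fun i => (Gb x.toList i : Int)) := by
  by_cases hx : x.toList.length = 0
  · show (PySem.List.pyRange ((x.toList.length : Int) - 1) 0 (-1)).foldl (pvStepB x.toList)
        (List.replicate x.toList.length 0) = _
    rw [hx]
    rw [pyRange_neg1_nil _ _ (by norm_num)]
    rfl
  · have hpos : 0 < x.toList.length := Nat.pos_of_ne_zero hx
    set l := x.toList with hl
    set n := l.length with hn
    unfold strict_border_array_alt
    simp only [← hl, ← hn]
    have hB := B_inv l hpos (n - 1) le_rfl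
    rw [show n - 1 - (n - 1) = 0 from by omega] at hB
    rw [show ((0 : Nat) : Int) = 0 from rfl] at hB
    rw [hB]
    rfl

-- ===== VERDICT (by name: the statement is the Claim_ definition above) =====
theorem strict_border_array_spec : Claim_equal_strict_border_array := by
  intro x _
  unfold Spec_strict_border_array
  rw [A_chars, B_chars]
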